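-- pv_equiv track=rewrite | github.com/eliottcassidy2000/math | 04-computation/four_reversal_phase_transition.py | lambda_graph
-- ===== SOURCE A (Python) =====
-- def lambda_graph(A, n):
--     lam = [[0]*n for _ in range(n)]
--     for u in range(n):
--         for v in range(u+1, n):
--             count = 0
--             for w in range(n):
--                 if w == u or w == v:
--                     continue
--                 if ((A[u][v] and A[v][w] and A[w][u]) or
--                     (A[u][w] and A[w][v] and A[v][u])):
--                     count += 1
--             lam[u][v] = count
--             lam[v][u] = count
--     return lam
-- ===== SOURCE B (Python) =====
-- def lambda_graph(A, n):
--     succ = [{w for w in range(n) if A[x][w]} for x in range(n)]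
--     pred = [{w for w in range(n) if A[w][x]} for x in range(n)]
--
--     def tri(u, v):
--         s = set()
--         if A[u][v]:
--             s |= succ[v] & pred[u]
--         if A[v][u]:
--             s |= succ[u] & pred[v]
--         s.discard(u)
--         s.discard(v)
--         return len(s)
--
--     return [[0 if u == v else tri(u, v) for v in range(n)] for u in range(n)]
-- ===== Notes on version B (the rewrite author's own statement) =====
-- stated objective: alternative
-- what changed: The inner loop over w is replaced by precomputed successor/predecessor neighbor sets combined with per-pair set intersection/union/discard, and the matrix is built directly by comprehension instead of mutating both triangle entries of a zero matrix.
-- outside the precondition, e.g. on lambda_graph([[0, 0], [0]], 2): A returns [[0, 0], [0, 0]], B raises IndexError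
import Mathlib
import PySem

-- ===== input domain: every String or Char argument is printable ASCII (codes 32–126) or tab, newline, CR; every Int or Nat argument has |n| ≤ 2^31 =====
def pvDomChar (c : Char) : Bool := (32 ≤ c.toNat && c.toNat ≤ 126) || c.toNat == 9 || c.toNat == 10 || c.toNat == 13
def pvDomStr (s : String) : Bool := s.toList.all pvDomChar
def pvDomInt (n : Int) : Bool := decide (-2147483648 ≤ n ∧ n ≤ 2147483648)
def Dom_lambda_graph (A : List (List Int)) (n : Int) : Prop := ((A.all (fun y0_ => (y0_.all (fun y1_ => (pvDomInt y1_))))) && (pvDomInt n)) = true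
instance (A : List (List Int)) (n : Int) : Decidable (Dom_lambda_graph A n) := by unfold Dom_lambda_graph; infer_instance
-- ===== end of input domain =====

-- B replaces A's inner w-loop by precomputed successor/predecessor neighbor sets combined with
-- per-pair set intersection/union/discard, and builds the matrix directly by comprehension
-- instead of mutating both triangle entries of a zero matrix (objective: alternative algorithm).

-- ===== PORT A =====
-- A[i][j] (both indexes nonnegative and in range under Pre_; exact there)
def pvCell (A : List (List Int)) (i j : Int) : Int :=
  PySem.List.pyGetD (PySem.List.pyGetD A i []) j 0

-- lam[i][j] = x  (row lookup then in-place element assignment)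
def pvSet2 (m : List (List Int)) (i j : Int) (x : Int) : List (List Int) :=
  PySem.List.pySetD m i (PySem.List.pySetD (PySem.List.pyGetD m i []) j x)

-- the inner 'for w in range(n)' counting loop of A
def pvCountA (A : List (List Int)) (n u v : Int) : Int :=
  (PySem.List.pyRange 0 n 1).foldl (fun c w =>
    if w = u ∨ w = v then c
    else if (pvCell A u v ≠ 0 ∧ pvCell A v w ≠ 0 ∧ pvCell A w u ≠ 0) ∨
            (pvCell A u w ≠ 0 ∧ pvCell A w v ≠ 0 ∧ pvCell A v u ≠ 0) then c + 1
    else c) 0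

def lambda_graph (A : List (List Int)) (n : Int) : List (List Int) :=
  let lam0 := (PySem.List.pyRange 0 n 1).map (fun _ => List.replicate n.toNat (0 : Int))
  (PySem.List.pyRange 0 n 1).foldl (fun lam u =>
    (PySem.List.pyRange (u+1) n 1).foldl (fun lam v =>
      let count := pvCountA A n u v
      pvSet2 (pvSet2 lam u v count) v u count) lam) lam0

-- ===== PORT B =====
-- succ[x] = {w in range(n) | A[x][w]}
def pvSucc (A : List (List Int)) (n : Int) : List (PySem.Set Int) :=
  (PySem.List.pyRange 0 n 1).map (fun x =>
    PySem.Set.ofList ((PySem.List.pyRange 0 n 1).filter (fun w => decide (pvCell A x w ≠ 0))))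

-- pred[x] = {w in range(n) | A[w][x]}
def pvPred (A : List (List Int)) (n : Int) : List (PySem.Set Int) :=
  (PySem.List.pyRange 0 n 1).map (fun x =>
    PySem.Set.ofList ((PySem.List.pyRange 0 n 1).filter (fun w => decide (pvCell A w x ≠ 0))))

-- tri(u, v) of B: gated intersections, union, discard u and v, then the size
def pvTri (A : List (List Int)) (succ pred : List (PySem.Set Int)) (u v : Int) : Int :=
  let s0 : PySem.Set Int := PySem.Set.empty
  let s1 := if pvCell A u v ≠ 0 then
      PySem.Set.union s0 (PySem.Set.inter (PySem.List.pyGetD succ v []) (PySem.List.pyGetD pred u []))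
    else s0
  let s2 := if pvCell A v u ≠ 0 then
      PySem.Set.union s1 (PySem.Set.inter (PySem.List.pyGetD succ u []) (PySem.List.pyGetD pred v []))
    else s1
  PySem.Set.len (PySem.Set.discard (PySem.Set.discard s2 u) v)

def lambda_graph_alt (A : List (List Int)) (n : Int) : List (List Int) :=
  let succ := pvSucc A n
  let pred := pvPred A n
  (PySem.List.pyRange 0 n 1).map (fun u =>
    (PySem.List.pyRange 0 n 1).map (fun v =>
      if u = v then 0 else pvTri A succ pred u v))

-- ===== PRECONDITION & SPEC =====
-- Pre_ excludes the inputs on which indexing raises IndexError (n exceeding the number of rows, or a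
-- row among the first n shorter than n); A may still return on a few such ragged inputs thanks to
-- 'and' short-circuiting, and there B itself raises IndexError, so those stay excluded.
def Pre_lambda_graph (A : List (List Int)) (n : Int) : Prop :=
  0 < n → (n ≤ (A.length : Int) ∧ ∀ row ∈ A.take n.toNat, n ≤ (row.length : Int))
instance (A : List (List Int)) (n : Int) : Decidable (Pre_lambda_graph A n) := by
  unfold Pre_lambda_graph; infer_instance

def pvWitness_lambda_graph : List (List Int) × Int := ([[0, 1, 1], [1, 0, 0], [1, 1, 0]], 3)

def Spec_lambda_graph (A : List (List Int)) (n : Int) (out : List (List Int)) : Prop := out = lambda_graph_alt A n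
instance (A : List (List Int)) (n : Int) (out : List (List Int)) : Decidable (Spec_lambda_graph A n out) := by unfold Spec_lambda_graph; infer_instance

-- ===== CLAIM (what is proved, stated in full; the proofs are below) =====
def Claim_equal_lambda_graph : Prop := ∀ (A : List (List Int)) (n : Int), Dom_lambda_graph A n → Pre_lambda_graph A n → Spec_lambda_graph A n (lambda_graph A n)

-- ===== LEMMAS AND PROOFS =====

-- the predicate A's inner loop counts (abbrev so that decidability is found by unfolding)
abbrev pvP (A : List (List Int)) (u v w : Int) : Prop :=
  ¬(w = u ∨ w = v) ∧
  ((pvCell A u v ≠ 0 ∧ pvCell A v w ≠ 0 ∧ pvCell A w u ≠ 0) ∨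
   (pvCell A u w ≠ 0 ∧ pvCell A w v ≠ 0 ∧ pvCell A v u ≠ 0))

theorem pvCountA_eq_countP (A : List (List Int)) (n u v : Int) :
    pvCountA A n u v =
      ((PySem.List.pyRange 0 n 1).countP (fun w => decide (pvP A u v w)) : Int) := by
  unfold pvCountA
  have hf : (fun (c : Int) (w : Int) =>
      if w = u ∨ w = v then c
      else if (pvCell A u v ≠ 0 ∧ pvCell A v w ≠ 0 ∧ pvCell A w u ≠ 0) ∨
              (pvCell A u w ≠ 0 ∧ pvCell A w v ≠ 0 ∧ pvCell A v u ≠ 0) then c + 1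
      else c)
      = (fun (c : Int) (w : Int) => if pvP A u v w then c + 1 else c) := by
    funext c w
    by_cases h1 : w = u ∨ w = v <;> by_cases h2 :
        (pvCell A u v ≠ 0 ∧ pvCell A v w ≠ 0 ∧ pvCell A w u ≠ 0) ∨
        (pvCell A u w ≠ 0 ∧ pvCell A w v ≠ 0 ∧ pvCell A v u ≠ 0) <;>
      simp [pvP, h1, h2]
  rw [hf, PySem.List.foldl_ite_add_one]
  simp

theorem pvP_symm (A : List (List Int)) (u v w : Int) : pvP A u v w ↔ pvP A v u w := by
  unfold pvP; tauto

theorem pvCountA_symm (A : List (List Int)) (n u v : Int) :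
    pvCountA A n u v = pvCountA A n v u := by
  rw [pvCountA_eq_countP, pvCountA_eq_countP]
  congr 1
  refine List.countP_congr (fun w _ => ?_)
  simp only [decide_eq_true_iff]
  exact pvP_symm A u v w

-- B's tri(u,v) counts exactly the same predicate
theorem pvTri_eq_countP (A : List (List Int)) (n u v : Int)
    (hu0 : 0 ≤ u) (hun : u < n) (hv0 : 0 ≤ v) (hvn : v < n) :
    pvTri A (pvSucc A n) (pvPred A n) u v =
      ((PySem.List.pyRange 0 n 1).countP (fun w => decide (pvP A u v w)) : Int) := by
  unfold pvTri
  dsimp only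
  have hsucc : ∀ x : Int, 0 ≤ x → x < n → PySem.List.pyGetD (pvSucc A n) x [] =
      PySem.Set.ofList ((PySem.List.pyRange 0 n 1).filter (fun w => decide (pvCell A x w ≠ 0))) := by
    intro x h0 h1
    unfold pvSucc
    exact PySem.List.pyGetD_map_pyRange_of_nonneg _ n x [] h0 h1
  have hpred : ∀ x : Int, 0 ≤ x → x < n → PySem.List.pyGetD (pvPred A n) x [] =
      PySem.Set.ofList ((PySem.List.pyRange 0 n 1).filter (fun w => decide (pvCell A w x ≠ 0))) := by
    intro x h0 h1
    unfold pvPred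
    exact PySem.List.pyGetD_map_pyRange_of_nonneg _ n x [] h0 h1
  set s1 := if pvCell A u v ≠ 0 then
      PySem.Set.union (PySem.Set.empty)
        (PySem.Set.inter (PySem.List.pyGetD (pvSucc A n) v []) (PySem.List.pyGetD (pvPred A n) u []))
    else (PySem.Set.empty : PySem.Set Int) with hs1
  set s2 := if pvCell A v u ≠ 0 then
      PySem.Set.union s1
        (PySem.Set.inter (PySem.List.pyGetD (pvSucc A n) u []) (PySem.List.pyGetD (pvPred A n) v []))
    else s1 with hs2
  have hnd1 : List.Nodup s1 := by
    rw [hs1]; split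
    · exact PySem.Set.nodup_union _ _ (List.nodup_nil)
    · exact List.nodup_nil
  have hnd2 : List.Nodup s2 := by
    rw [hs2]; split
    · exact PySem.Set.nodup_union _ _ hnd1
    · exact hnd1
  have hm1 : ∀ w : Int, w ∈ s1 ↔ w ∈ PySem.List.pyRange 0 n 1 ∧
      (pvCell A u v ≠ 0 ∧ pvCell A v w ≠ 0 ∧ pvCell A w u ≠ 0) := by
    intro w
    rw [hs1]; split
    · rename_i hg
      rw [PySem.Set.mem_union, PySem.Set.mem_inter, hsucc v hv0 hvn, hpred u hu0 hun,
        PySem.Set.mem_ofList, PySem.Set.mem_ofList, List.mem_filter, List.mem_filter]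
      simp only [PySem.Set.empty, List.not_mem_nil, false_or, decide_eq_true_iff]
      tauto
    · rename_i hg
      simp only [PySem.Set.empty, List.not_mem_nil, false_iff]
      tauto
  have hm2 : ∀ w : Int, w ∈ s2 ↔ w ∈ PySem.List.pyRange 0 n 1 ∧
      ((pvCell A u v ≠ 0 ∧ pvCell A v w ≠ 0 ∧ pvCell A w u ≠ 0) ∨
       (pvCell A u w ≠ 0 ∧ pvCell A w v ≠ 0 ∧ pvCell A v u ≠ 0)) := by
    intro w
    rw [hs2]; split
    · rename_i hg
      rw [PySem.Set.mem_union, PySem.Set.mem_inter, hsucc u hu0 hun, hpred v hv0 hvn,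
        PySem.Set.mem_ofList, PySem.Set.mem_ofList, List.mem_filter, List.mem_filter, hm1 w]
      simp only [decide_eq_true_iff]
      tauto
    · rename_i hg
      rw [hm1 w]
      tauto
  have hndf : List.Nodup (PySem.Set.discard (PySem.Set.discard s2 u) v) :=
    PySem.Set.nodup_discard _ _ (PySem.Set.nodup_discard _ _ hnd2)
  have hmemf : ∀ w : Int, w ∈ PySem.Set.discard (PySem.Set.discard s2 u) v ↔
      w ∈ (PySem.List.pyRange 0 n 1).filter (fun w => decide (pvP A u v w)) := by
    intro w
    rw [PySem.Set.mem_discard, PySem.Set.mem_discard, hm2 w, List.mem_filter]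
    simp only [decide_eq_true_iff]
    unfold pvP
    tauto
  have hperm : (PySem.Set.discard (PySem.Set.discard s2 u) v).Perm
      ((PySem.List.pyRange 0 n 1).filter (fun w => decide (pvP A u v w))) :=
    (List.perm_ext_iff_of_nodup hndf ((PySem.List.nodup_pyRange_one 0 n).filter _)).mpr hmemf
  have hlen := hperm.length_eq
  show (((s2.discard u).discard v).length : Int) = _
  rw [hlen, List.countP_eq_length_filter]

-- entry / shape machinery for A's in-place fill
def pvShape (m : List (List Int)) (n : Int) : Prop :=
  m.length = n.toNat ∧ ∀ i : Int, 0 ≤ i → i < n → (PySem.List.pyGetD m i []).length = n.toNat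

theorem pvSet2_cell (m : List (List Int)) (n i j : Int) (x : Int) (hs : pvShape m n)
    (hi0 : 0 ≤ i) (hin : i < n) (hj0 : 0 ≤ j) (hjn : j < n) (p q : Int)
    (hp0 : 0 ≤ p) (hq0 : 0 ≤ q) :
    pvCell (pvSet2 m i j x) p q = if p = i ∧ q = j then x else pvCell m p q := by
  obtain ⟨hlen, hrow⟩ := hs
  have hjlen : j.toNat < (PySem.List.pyGetD m i []).length := by rw [hrow i hi0 hin]; omega
  obtain ⟨i', rfl⟩ : ∃ k : Nat, i = (k : Int) := ⟨i.toNat, by omega⟩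
  obtain ⟨j', rfl⟩ : ∃ k : Nat, j = (k : Int) := ⟨j.toNat, by omega⟩
  obtain ⟨p', rfl⟩ : ∃ k : Nat, p = (k : Int) := ⟨p.toNat, by omega⟩
  obtain ⟨q', rfl⟩ : ∃ k : Nat, q = (k : Int) := ⟨q.toNat, by omega⟩
  have hilen : i' < m.length := by omega
  have hjlen' : j' < (PySem.List.pyGetD m (i' : Int) []).length := by
    simpa using hjlen
  unfold pvSet2 pvCell
  rw [PySem.List.pyGetD_pySetD_natCast m i' p' _ [] hilen]
  by_cases hpi : p' = i'
  · subst hpi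
    rw [if_pos rfl, PySem.List.pyGetD_pySetD_natCast _ j' q' x 0 hjlen']
    by_cases hqj : q' = j'
    · subst hqj
      rw [if_pos rfl, if_pos ⟨rfl, rfl⟩]
    · rw [if_neg hqj, if_neg (by simp [hqj])]
  · rw [if_neg hpi, if_neg (by simp [hpi])]

theorem pvSet2_shape (m : List (List Int)) (n i j : Int) (x : Int) (hs : pvShape m n)
    (hi0 : 0 ≤ i) (hin : i < n) : pvShape (pvSet2 m i j x) n := by
  obtain ⟨hlen, hrow⟩ := hs
  have hilen : i.toNat < m.length := by omega
  obtain ⟨i', rfl⟩ : ∃ k : Nat, i = (k : Int) := ⟨i.toNat, by omega⟩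
  constructor
  · unfold pvSet2; rw [PySem.List.length_pySetD]; exact hlen
  · intro t ht0 htn
    obtain ⟨t', rfl⟩ : ∃ k : Nat, t = (k : Int) := ⟨t.toNat, by omega⟩
    unfold pvSet2
    rw [PySem.List.pyGetD_pySetD_natCast m i' t' _ [] (by simpa using hilen)]
    split
    · rename_i he
      rw [PySem.List.length_pySetD]
      exact hrow (i' : Int) hi0 hin
    · exact hrow (t' : Int) ht0 htn

-- the inner 'for v in range(u+1, n)' fold: writes (u,v) and (v,u) for every v in [b, n)
theorem pvInner_fold (A : List (List Int)) (n u : Int) (hu0 : 0 ≤ u) (hun : u < n) :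
    ∀ (k : Nat) (b : Int) (m : List (List Int)), u < b → (n - b).toNat ≤ k → pvShape m n →
      pvShape ((PySem.List.pyRange b n 1).foldl (fun lam v =>
          pvSet2 (pvSet2 lam u v (pvCountA A n u v)) v u (pvCountA A n u v)) m) n ∧
      ∀ p q : Int, 0 ≤ p → 0 ≤ q →
        pvCell ((PySem.List.pyRange b n 1).foldl (fun lam v =>
            pvSet2 (pvSet2 lam u v (pvCountA A n u v)) v u (pvCountA A n u v)) m) p q =
          if p = u ∧ b ≤ q ∧ q < n then pvCountA A n u q
          else if q = u ∧ b ≤ p ∧ p < n then pvCountA A n u p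
          else pvCell m p q := by
  intro k
  induction k with
  | zero =>
    intro b m hub hk hs
    have hnb : n ≤ b := by omega
    rw [PySem.List.pyRange_one_eq_nil hnb]
    refine ⟨hs, fun p q _ _ => ?_⟩
    simp only [List.foldl_nil]
    split
    · omega
    · split
      · omega
      · rfl
  | succ k ih =>
    intro b m hub hk hs
    rcases le_or_gt n b with hnb | hbn
    · rw [PySem.List.pyRange_one_eq_nil hnb]
      refine ⟨hs, fun p q _ _ => ?_⟩
      simp only [List.foldl_nil]
      split
      · omega
      · split
        · omega
        · rfl
    · rw [PySem.List.pyRange_one_cons hbn, List.foldl_cons]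
      have hb0 : (0 : Int) ≤ b := by omega
      have hs1 : pvShape (pvSet2 m u b (pvCountA A n u b)) n :=
        pvSet2_shape m n u b _ hs hu0 hun
      have hs2 : pvShape (pvSet2 (pvSet2 m u b (pvCountA A n u b)) b u (pvCountA A n u b)) n :=
        pvSet2_shape _ n b u _ hs1 hb0 hbn
      obtain ⟨ihs, ihc⟩ := ih (b + 1) _ (by omega) (by omega) hs2
      refine ⟨ihs, fun p q hp0 hq0 => ?_⟩
      rw [ihc p q hp0 hq0,
        pvSet2_cell _ n b u _ hs1 hb0 hbn hu0 hun p q hp0 hq0,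
        pvSet2_cell _ n u b _ hs hu0 hun hb0 hbn p q hp0 hq0]
      by_cases hpu : p = u <;> by_cases hqu : q = u <;>
        by_cases hpb : p = b <;> by_cases hqb : q = b <;>
        split_ifs <;> first
          | rfl
          | omega
          | (subst_vars; rfl)

-- the outer 'for u in range(n)' fold fills every off-diagonal pair with min/max ≥ a
theorem pvOuter_fold (A : List (List Int)) (n : Int) :
    ∀ (k : Nat) (a : Int) (m : List (List Int)), 0 ≤ a → (n - a).toNat ≤ k → pvShape m n →
      pvShape ((PySem.List.pyRange a n 1).foldl (fun lam u =>
          (PySem.List.pyRange (u+1) n 1).foldl (fun lam v =>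
            pvSet2 (pvSet2 lam u v (pvCountA A n u v)) v u (pvCountA A n u v)) lam) m) n ∧
      ∀ p q : Int, 0 ≤ p → 0 ≤ q →
        pvCell ((PySem.List.pyRange a n 1).foldl (fun lam u =>
            (PySem.List.pyRange (u+1) n 1).foldl (fun lam v =>
              pvSet2 (pvSet2 lam u v (pvCountA A n u v)) v u (pvCountA A n u v)) lam) m) p q =
          if a ≤ p ∧ p < n ∧ a ≤ q ∧ q < n ∧ p ≠ q then pvCountA A n (min p q) (max p q)
          else pvCell m p q := by
  intro k
  induction k with
  | zero =>
    intro a m ha0 hk hs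
    have hna : n ≤ a := by omega
    rw [PySem.List.pyRange_one_eq_nil hna]
    refine ⟨hs, fun p q _ _ => ?_⟩
    simp only [List.foldl_nil]
    split
    · omega
    · rfl
  | succ k ih =>
    intro a m ha0 hk hs
    rcases le_or_gt n a with hna | han
    · rw [PySem.List.pyRange_one_eq_nil hna]
      refine ⟨hs, fun p q _ _ => ?_⟩
      simp only [List.foldl_nil]
      split
      · omega
      · rfl
    · rw [PySem.List.pyRange_one_cons han, List.foldl_cons]
      obtain ⟨hIs, hIc⟩ := pvInner_fold A n a ha0 han ((n - (a+1)).toNat) (a + 1) m (by omega)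
        (by omega) hs
      obtain ⟨ohs, ohc⟩ := ih (a + 1) _ (by omega) (by omega) hIs
      refine ⟨ohs, fun p q hp0 hq0 => ?_⟩
      rw [ohc p q hp0 hq0, hIc p q hp0 hq0]
      by_cases hT : a ≤ p ∧ p < n ∧ a ≤ q ∧ q < n ∧ p ≠ q
      · rw [if_pos hT]
        obtain ⟨h1, h2, h3, h4, h5⟩ := hT
        by_cases hB : a + 1 ≤ p ∧ p < n ∧ a + 1 ≤ q ∧ q < n ∧ p ≠ q
        · rw [if_pos hB]
        · rw [if_neg hB]
          rcases eq_or_ne p a with rfl | hpa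
          · rw [if_pos ⟨rfl, by omega, h4⟩, min_eq_left (by omega : p ≤ q),
              max_eq_right (by omega : p ≤ q)]
          · have hqa : q = a := by omega
            subst hqa
            rw [if_neg (by omega), if_pos ⟨rfl, by omega, h2⟩,
              min_eq_right (by omega : q ≤ p), max_eq_left (by omega : q ≤ p)]
      · rw [if_neg hT, if_neg (fun h => hT (by omega)),
          if_neg (fun h => hT (by omega)), if_neg (fun h => hT (by omega))]

theorem pvGetD_replicate_zero (k : Nat) (q : Int) :
    PySem.List.pyGetD (List.replicate k (0 : Int)) q 0 = 0 := by
  unfold PySem.List.pyGetD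
  cases hg : PySem.List.pyGet? (List.replicate k (0 : Int)) q with
  | none => rfl
  | some a =>
    have ha : a ∈ List.replicate k (0 : Int) := PySem.List.mem_of_pyGet?_eq_some _ hg
    simp [List.eq_of_mem_replicate ha]

theorem pvCell_lam0 (n p q : Int)
    (hp0 : 0 ≤ p) (hpn : p < n) :
    pvCell ((PySem.List.pyRange 0 n 1).map (fun _ => List.replicate n.toNat (0 : Int))) p q = 0 := by
  unfold pvCell
  rw [PySem.List.pyGetD_map_pyRange_of_nonneg _ n p [] hp0 hpn]
  exact pvGetD_replicate_zero n.toNat q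

theorem pvShape_lam0 (n : Int) :
    pvShape ((PySem.List.pyRange 0 n 1).map (fun _ => List.replicate n.toNat (0 : Int))) n := by
  constructor
  · rw [List.length_map, PySem.List.length_pyRange_one]; omega
  · intro i hi0 hin
    rw [PySem.List.pyGetD_map_pyRange_of_nonneg _ n i [] hi0 hin, List.length_replicate]

theorem lambda_graph_eq_alt (A : List (List Int)) (n : Int) :
    lambda_graph A n = lambda_graph_alt A n := by
  unfold lambda_graph lambda_graph_alt
  dsimp only
  obtain ⟨⟨hL, hR⟩, hC⟩ := pvOuter_fold A n ((n - 0).toNat) 0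
    ((PySem.List.pyRange 0 n 1).map (fun _ => List.replicate n.toNat (0 : Int)))
    le_rfl le_rfl (pvShape_lam0 n)
  set res := (PySem.List.pyRange 0 n 1).foldl (fun lam u =>
      (PySem.List.pyRange (u+1) n 1).foldl (fun lam v =>
        pvSet2 (pvSet2 lam u v (pvCountA A n u v)) v u (pvCountA A n u v)) lam)
      ((PySem.List.pyRange 0 n 1).map (fun _ => List.replicate n.toNat (0 : Int))) with hres
  set rhs := (PySem.List.pyRange 0 n 1).map (fun u =>
      (PySem.List.pyRange 0 n 1).map (fun v =>
        if u = v then 0 else pvTri A (pvSucc A n) (pvPred A n) u v)) with hrhs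
  apply List.ext_getElem
  · rw [hL, hrhs, List.length_map, PySem.List.length_pyRange_one]; omega
  · intro i hi1 hi2
    have hi : i < n.toNat := by rwa [hL] at hi1
    have hi0 : (0 : Int) ≤ (i : Int) := by omega
    have hin : ((i : Nat) : Int) < n := by omega
    have hrowres : res.getD i [] = res[i] := List.getD_eq_getElem res [] hi1
    have hrowlen : res[i].length = n.toNat := by
      rw [← hrowres, ← PySem.List.pyGetD_natCast res i []]
      exact hR ((i : Nat) : Int) hi0 hin
    have hrhsrow : rhs.getD i [] = (PySem.List.pyRange 0 n 1).map (fun v =>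
        if ((i : Nat) : Int) = v then 0 else pvTri A (pvSucc A n) (pvPred A n) ((i : Nat) : Int) v) := by
      rw [← PySem.List.pyGetD_natCast rhs i [], hrhs]
      exact PySem.List.pyGetD_map_pyRange_of_nonneg _ n _ [] hi0 hin
    have hrhsrow' : rhs.getD i [] = rhs[i] := List.getD_eq_getElem rhs [] hi2
    apply List.ext_getElem
    · rw [hrowlen, ← hrhsrow', hrhsrow, List.length_map, PySem.List.length_pyRange_one]
      omega
    · intro j hj1 hj2
      have hj : j < n.toNat := by rwa [hrowlen] at hj1
      have hj0 : (0 : Int) ≤ (j : Int) := by omega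
      have hjn : ((j : Nat) : Int) < n := by omega
      have hLside : res[i][j] = pvCell res ((i : Nat) : Int) ((j : Nat) : Int) := by
        unfold pvCell
        rw [PySem.List.pyGetD_natCast res i [], PySem.List.pyGetD_natCast _ j 0, hrowres,
          List.getD_eq_getElem res[i] 0 hj1]
      have hRside : rhs[i][j] =
          (if ((i : Nat) : Int) = ((j : Nat) : Int) then 0
           else pvTri A (pvSucc A n) (pvPred A n) ((i : Nat) : Int) ((j : Nat) : Int)) := by
        have h1 : rhs[i][j] = (rhs[i]).getD j 0 := (List.getD_eq_getElem rhs[i] 0 hj2).symm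
        rw [h1, ← hrhsrow', hrhsrow, ← PySem.List.pyGetD_natCast _ j 0]
        exact PySem.List.pyGetD_map_pyRange_of_nonneg _ n _ 0 hj0 hjn
      rw [hLside, hRside, hC _ _ hi0 hj0]
      rcases eq_or_ne ((i : Nat) : Int) ((j : Nat) : Int) with hij | hij
      · rw [if_pos hij, if_neg (by omega)]
        exact pvCell_lam0 n _ _ hi0 hin
      · rw [if_neg hij, if_pos ⟨hi0, hin, hj0, hjn, hij⟩]
        rw [pvTri_eq_countP A n _ _ hi0 hin hj0 hjn, ← pvCountA_eq_countP]
        rcases le_or_gt ((i : Nat) : Int) ((j : Nat) : Int) with h | h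
        · rw [min_eq_left h, max_eq_right h]
        · rw [min_eq_right (le_of_lt h), max_eq_left (le_of_lt h), pvCountA_symm]

-- ===== VERDICT (by name: the statement is the Claim_ definition above) =====
theorem lambda_graph_spec : Claim_equal_lambda_graph := by
  intro A n _ _
  unfold Spec_lambda_graph
  exact lambda_graph_eq_alt A n
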